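-- pv_equiv track=rewrite | github.com/JoonHyeok-hozy-Kim/algorithm_study | BaekJoon/Solutions/Week3/Sol_E_220928_1285_failed.py | flip_col
-- ===== SOURCE A (Python) =====
-- def flip_col(coin_set, col_idx):
--     N = len(coin_set)-1
--     checker = pow(2, col_idx)
--     for i in range(N):
--         if coin_set[i] & checker:
--             coin_set[i] -= checker
--             coin_set[-1] -= 1
--         else:
--             coin_set[i] += checker
--             coin_set[-1] += 1
--     return coin_set
-- ===== SOURCE B (Python) =====
-- def flip_col(coin_set, col_idx):
--     n = len(coin_set) - 1
--     checker = 2 ** col_idx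
--     c = sum(1 for x in coin_set[:n] if x & checker)
--     res = [x ^ checker for x in coin_set[:n]] + coin_set[n:]
--     if n > 0:
--         res[-1] += n - 2 * c
--     coin_set[:] = res
--     return coin_set
-- ===== Notes on version B (the rewrite author's own statement) =====
-- stated objective: alternative
-- what changed: Replaces A's per-row if/else add-or-subtract with interleaved counter increments by a count pass, a uniform XOR-flip of the first n rows, and a single closed-form counter update n-2c; Pre_ excludes only inputs where A raises (TypeError from a float bit mask): length >= 2 with negative col_idx.
import Mathlib
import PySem

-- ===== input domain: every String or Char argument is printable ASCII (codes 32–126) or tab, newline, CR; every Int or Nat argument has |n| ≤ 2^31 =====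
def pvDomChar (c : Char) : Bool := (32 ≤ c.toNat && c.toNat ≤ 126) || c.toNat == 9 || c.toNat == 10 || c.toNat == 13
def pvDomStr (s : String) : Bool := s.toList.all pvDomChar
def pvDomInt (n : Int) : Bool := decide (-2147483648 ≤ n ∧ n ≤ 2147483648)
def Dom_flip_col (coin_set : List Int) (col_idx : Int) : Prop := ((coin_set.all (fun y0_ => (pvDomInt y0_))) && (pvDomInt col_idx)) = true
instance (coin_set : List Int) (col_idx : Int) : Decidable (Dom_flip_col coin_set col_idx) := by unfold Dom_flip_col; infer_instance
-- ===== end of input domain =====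

-- B replaces A's interleaved per-row if/else bookkeeping by a count pass, a uniform XOR flip of the
-- first n rows, and one closed-form counter update n - 2*c (alternative decomposition, same cost).
-- Both A and B mutate coin_set in place the same way; the equivalence proved here is about the return value.


-- ===== PORT A =====
-- loop body of A: 'if coin_set[i] & checker: coin_set[i] -= checker; coin_set[-1] -= 1 else: ...'
def flipStep (checker : Int) (cs : List Int) (i : Int) : List Int :=
  if PySem.Int.band (PySem.List.pyGetD cs i 0) checker ≠ 0 then
    let cs1 := PySem.List.pySetD cs i (PySem.List.pyGetD cs i 0 - checker)
    PySem.List.pySetD cs1 (-1) (PySem.List.pyGetD cs1 (-1) 0 - 1)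
  else
    let cs1 := PySem.List.pySetD cs i (PySem.List.pyGetD cs i 0 + checker)
    PySem.List.pySetD cs1 (-1) (PySem.List.pyGetD cs1 (-1) 0 + 1)

def flip_col (coin_set : List Int) (col_idx : Int) : List Int :=
  let N : Int := PySem.List.len coin_set - 1
  -- checker = pow(2, col_idx); exact whenever the loop body runs (Pre_ then gives 0 ≤ col_idx)
  let checker : Int := 2 ^ col_idx.toNat
  (PySem.List.pyRange 0 N 1).foldl (flipStep checker) coin_set

-- ===== PORT B =====
def flip_col_alt (coin_set : List Int) (col_idx : Int) : List Int :=
  let n : Int := PySem.List.len coin_set - 1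
  let checker : Int := 2 ^ col_idx.toNat
  -- c = sum(1 for x in coin_set[:n] if x & checker)
  let c : Int := ((PySem.List.slice coin_set none (some n)).filter
      (fun x => PySem.Int.band x checker != 0)).length
  -- res = [x ^ checker for x in coin_set[:n]] + coin_set[n:]
  let res := (PySem.List.slice coin_set none (some n)).map (fun x => PySem.Int.bxor x checker)
      ++ PySem.List.slice coin_set (some n) none
  -- if n > 0: res[-1] += n - 2*c
  if 0 < n then PySem.List.pySetD res (-1) (PySem.List.pyGetD res (-1) 0 + (n - 2 * c)) else res

-- ===== PRECONDITION & SPEC =====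
-- Pre_ excludes exactly the inputs on which Python A raises: with at least two elements and a
-- negative col_idx, pow(2, col_idx) is a float and 'coin_set[i] & checker' raises TypeError.
def Pre_flip_col (coin_set : List Int) (col_idx : Int) : Prop := coin_set.length ≤ 1 ∨ 0 ≤ col_idx
instance (coin_set : List Int) (col_idx : Int) : Decidable (Pre_flip_col coin_set col_idx) := by unfold Pre_flip_col; infer_instance
def pvWitness_flip_col : List Int × Int := ([5, 3, 0], 1)
def Spec_flip_col (coin_set : List Int) (col_idx : Int) (out : List Int) : Prop := out = flip_col_alt coin_set col_idx
instance (coin_set : List Int) (col_idx : Int) (out : List Int) : Decidable (Spec_flip_col coin_set col_idx out) := by unfold Spec_flip_col; infer_instance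

-- ===== CLAIM (what is proved, stated in full; the proofs are below) =====
def Claim_equal_flip_col : Prop := ∀ (coin_set : List Int) (col_idx : Int), Dom_flip_col coin_set col_idx → Pre_flip_col coin_set col_idx → Spec_flip_col coin_set col_idx (flip_col coin_set col_idx)

-- ===== LEMMAS AND PROOFS =====

theorem xor_two_pow_of_testBit_false (k : Nat) : ∀ m : Nat, m.testBit k = false →
    m ^^^ 2 ^ k = m + 2 ^ k := by
  induction k with
  | zero =>
    intro m h
    have hm : m % 2 = 0 := by
      simp [Nat.testBit_zero] at h
      omega
    simpa using Nat.xor_one_of_even (Nat.even_iff.mpr hm)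
  | succ k ih =>
    intro m h
    have hd : Nat.bit (m.testBit 0) (m >>> 1) = m := Nat.bit_testBit_zero_shiftRight_one m
    have h2 : (2 : Nat) ^ (k + 1) = Nat.bit false (2 ^ k) := by
      simp [Nat.bit_val, Nat.pow_succ, Nat.mul_comm]
    have hb : (m >>> 1).testBit k = false := by
      rw [Nat.shiftRight_one]
      rw [Nat.testBit_add_one] at h
      exact h
    calc m ^^^ 2 ^ (k + 1)
        = Nat.bit (m.testBit 0) (m >>> 1) ^^^ Nat.bit false (2 ^ k) := by rw [hd, h2]
      _ = Nat.bit (bne (m.testBit 0) false) ((m >>> 1) ^^^ 2 ^ k) := Nat.xor_bit ..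
      _ = Nat.bit (m.testBit 0) ((m >>> 1) + 2 ^ k) := by rw [ih _ hb]; simp
      _ = m + 2 ^ (k + 1) := by
          rw [Nat.bit_val] at hd ⊢
          rw [Nat.pow_succ]
          omega

theorem xor_two_pow_of_testBit_true (m k : Nat) (h : m.testBit k = true) :
    2 ^ k ≤ m ∧ m ^^^ 2 ^ k = m - 2 ^ k := by
  have hle : 2 ^ k ≤ m := Nat.ge_two_pow_of_testBit h
  refine ⟨hle, ?_⟩
  have htog : (m ^^^ 2 ^ k).testBit k = false := by
    simp [Nat.testBit_xor, h]
  have := xor_two_pow_of_testBit_false k (m ^^^ 2 ^ k) htog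
  simp at this
  omega

theorem and_two_pow_eq (m k : Nat) :
    m &&& 2 ^ k = if m.testBit k then 2 ^ k else 0 := by
  rw [Nat.and_two_pow]
  cases h : m.testBit k <;> simp

-- Python 'x ^ 2**k' as two's-complement arithmetic: subtract the bit if set, add it if clear
theorem bxor_two_pow (x : Int) (k : Nat) :
    PySem.Int.bxor x (2 ^ k) = if PySem.Int.band x (2 ^ k) ≠ 0 then x - 2 ^ k else x + 2 ^ k := by
  have hk0 : (0 : Int) ≤ 2 ^ k := by positivity
  have hkt : ((2 ^ k : Int)).toNat = 2 ^ k := by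
    rw [show ((2 : Int) ^ k) = ((2 ^ k : Nat) : Int) by push_cast; ring]
    exact Int.toNat_natCast _
  have hkpos : (0 : Nat) < 2 ^ k := Nat.two_pow_pos k
  by_cases hx : 0 ≤ x
  · have hxm : ((x.toNat : Int)) = x := Int.toNat_of_nonneg hx
    simp only [PySem.Int.bxor, PySem.Int.band, if_pos hx, if_pos hk0, hkt]
    cases hbit : x.toNat.testBit k
    · have hand : x.toNat &&& 2 ^ k = 0 := by rw [and_two_pow_eq, hbit]; simp
      have hxor := xor_two_pow_of_testBit_false k x.toNat hbit
      rw [hand, hxor, if_neg (by simp)]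
      push_cast
      omega
    · obtain ⟨hle, hxor⟩ := xor_two_pow_of_testBit_true x.toNat k hbit
      have hand : x.toNat &&& 2 ^ k = 2 ^ k := by rw [and_two_pow_eq, hbit]; simp
      rw [hand, hxor]
      rw [if_pos (show ((2 ^ k : Nat) : Int) ≠ 0 by exact_mod_cast hkpos.ne')]
      push_cast [Nat.cast_sub hle]
      omega
  · have hxneg : x < 0 := by omega
    have hm : (((-x - 1).toNat : Int)) = -x - 1 := Int.toNat_of_nonneg (by omega)
    simp only [PySem.Int.bxor, PySem.Int.band, if_neg hx, if_pos hk0, hkt]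
    cases hbit : (-x - 1).toNat.testBit k
    · have hand : 2 ^ k &&& (-x - 1).toNat = 0 := by
        rw [Nat.and_comm, and_two_pow_eq, hbit]; simp
      have hxor := xor_two_pow_of_testBit_false k (-x - 1).toNat hbit
      rw [hand, hxor]
      rw [if_pos (by omega)]
      push_cast
      omega
    · obtain ⟨hle, hxor⟩ := xor_two_pow_of_testBit_true (-x - 1).toNat k hbit
      have hand : 2 ^ k &&& (-x - 1).toNat = 2 ^ k := by
        rw [Nat.and_comm, and_two_pow_eq, hbit]; simp
      rw [hand, hxor]
      rw [if_neg (by simp)]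
      push_cast [Nat.cast_sub hle]
      omega

-- writing the last element of a nonempty list via index -1
theorem pySetD_neg_one_append (ys : List Int) (z v : Int) :
    PySem.List.pySetD (ys ++ [z]) (-1) v = ys ++ [v] := by
  simp [PySem.List.pySetD, PySem.List.pySet?, PySem.List.pyIdx?]

-- one step of A's loop, at index pre.length, on state pre ++ x :: (mid ++ [lastv])
theorem flipStep_mid (chk : Int) (pre mid : List Int) (x lastv : Int) :
    flipStep chk (pre ++ x :: (mid ++ [lastv])) (pre.length : Int) =
      pre ++ (if PySem.Int.band x chk ≠ 0 then x - chk else x + chk) ::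
        (mid ++ [lastv + (if PySem.Int.band x chk ≠ 0 then -1 else 1)]) := by
  have hget : PySem.List.pyGetD (pre ++ x :: (mid ++ [lastv])) (pre.length : Int) 0 = x := by
    simp
  have hset : ∀ v : Int, PySem.List.pySetD (pre ++ x :: (mid ++ [lastv])) (pre.length : Int) v
      = (pre ++ v :: mid) ++ [lastv] := by
    intro v
    simp
  by_cases hb : PySem.Int.band x chk ≠ 0
  · simp only [flipStep, hget, if_pos hb, hset,
      PySem.List.pyGetD_neg_one_append_singleton, pySetD_neg_one_append]
    simp [sub_eq_add_neg]
  · simp only [flipStep, hget, if_neg hb, hset,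
      PySem.List.pyGetD_neg_one_append_singleton, pySetD_neg_one_append]
    simp

-- loop invariant: folding A's step over indices pre.length … pre.length + mid.length - 1
theorem flip_loop_inv (chk : Int) (mid : List Int) : ∀ (pre : List Int) (lastv : Int),
    (PySem.List.pyRange (pre.length : Int) ((pre.length : Int) + (mid.length : Int)) 1).foldl
        (flipStep chk) (pre ++ (mid ++ [lastv])) =
      pre ++ ((mid.map (fun x => if PySem.Int.band x chk ≠ 0 then x - chk else x + chk)) ++
        [lastv + ((mid.length : Int) -
          2 * ((mid.filter (fun x => PySem.Int.band x chk != 0)).length : Int))]) := by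
  induction mid with
  | nil =>
    intro pre lastv
    rw [PySem.List.pyRange_one_eq_nil (by simp)]
    simp
  | cons x mid ih =>
    intro pre lastv
    rw [PySem.List.pyRange_one_cons (by simp only [List.length_cons]; push_cast; omega)]
    simp only [List.foldl_cons, List.cons_append]
    rw [flipStep_mid]
    set x' : Int := if PySem.Int.band x chk ≠ 0 then x - chk else x + chk with hx'
    set e : Int := if PySem.Int.band x chk ≠ 0 then (-1 : Int) else 1 with he
    have hstate : pre ++ x' :: (mid ++ [lastv + e]) = (pre ++ [x']) ++ (mid ++ [lastv + e]) := by
      simp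
    have hlo : (pre.length : Int) + 1 = ((pre ++ [x']).length : Int) := by simp
    have hhi : (pre.length : Int) + ((x :: mid).length : Int)
        = ((pre ++ [x']).length : Int) + (mid.length : Int) := by
      simp only [List.length_cons, List.length_append, List.length_nil]
      push_cast
      omega
    rw [hstate, hhi, hlo, ih (pre ++ [x']) (lastv + e)]
    by_cases hb : PySem.Int.band x chk ≠ 0
    · simp only [hx', he, if_pos hb]
      have hf : PySem.Int.band x chk != 0 := by simpa using hb
      simp [hf, hb]
      ring
    · simp only [hx', he, if_neg hb]
      have hf : ¬ (PySem.Int.band x chk != 0) := by simpa using hb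
      simp [hf, hb]
      ring

-- ===== VERDICT (by name: the statement is the Claim_ definition above) =====
theorem flip_col_spec : Claim_equal_flip_col := by
  intro coin_set col_idx _hdom _hpre
  unfold Spec_flip_col
  rcases List.eq_nil_or_concat coin_set with rfl | ⟨front, lastv, rfl⟩
  · simp [flip_col, flip_col_alt, PySem.List.slice, PySem.List.clampIdx]
  · simp only [List.concat_eq_append]
    set chk : Int := 2 ^ col_idx.toNat with hchk
    have hN : PySem.List.len (front ++ [lastv]) - 1 = (front.length : Int) := by
      simp
    -- A's side via the loop invariant (pre = [])
    have hA := flip_loop_inv chk front [] lastv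
    simp only [List.length_nil, Nat.cast_zero, List.nil_append, Int.zero_add] at hA
    have hA' : flip_col (front ++ [lastv]) col_idx
        = (front.map (fun x => if PySem.Int.band x chk ≠ 0 then x - chk else x + chk)) ++
          [lastv + ((front.length : Int) -
            2 * ((front.filter (fun x => PySem.Int.band x chk != 0)).length : Int))] := by
      simp only [flip_col, hN]
      rw [show (0 : Int) = ((0 : Nat) : Int) by simp] at hA ⊢
      simpa using hA
    -- B's side
    have hB' : flip_col_alt (front ++ [lastv]) col_idx
        = (front.map (fun x => if PySem.Int.band x chk ≠ 0 then x - chk else x + chk)) ++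
          [lastv + ((front.length : Int) -
            2 * ((front.filter (fun x => PySem.Int.band x chk != 0)).length : Int))] := by
      simp only [flip_col_alt, hN, PySem.List.slice_to_natCast, PySem.List.slice_from_natCast,
        List.take_left, List.drop_left]
      simp only [← hchk]
      have hmap : front.map (fun x => PySem.Int.bxor x chk)
          = front.map (fun x => if PySem.Int.band x chk ≠ 0 then x - chk else x + chk) := by
        apply List.map_congr_left
        intro a _
        exact bxor_two_pow a col_idx.toNat
      rw [hmap]
      by_cases hf : front = []
      · subst hf
        simp
      · rw [if_pos (show (0 : Int) < (front.length : Int) by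
          have := List.length_pos_iff.mpr hf
          exact_mod_cast this)]
        rw [PySem.List.pyGetD_neg_one_append_singleton, pySetD_neg_one_append]
    rw [hA', hB']
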